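-- pv_equiv track=rewrite | github.com/johand/ztm-dsa | 4-How_to_solve_coding_problems/contains_common_item.py | contains_common_item
-- ===== SOURCE A (Python) =====
-- def contains_common_item(lst1, lst2):
--     # Loop through first list and create object where properties === items in
--     # the array
--     dict = {}
--
--     for i in lst1:
--         if i not in dict:
--             dict[i] = True
--
--     # loop through second list and check if item in second list exists on
--     # created object
--     for j in lst2:
--         if j in dict:
--             return True
--
--     return False
-- ===== SOURCE B (Python) =====
-- def contains_common_item(lst1, lst2):
--     a = sorted(lst1)
--     b = sorted(lst2)
--     i = j = 0
--     while i < len(a) and j < len(b):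
--         if a[i] == b[j]:
--             return True
--         if a[i] < b[j]:
--             i += 1
--         else:
--             j += 1
--     return False
-- ===== Notes on version B (the rewrite author's own statement) =====
-- stated objective: alternative
-- what changed: Replaced the hash-based dict build plus lookup scan with a sort-then-merge: both lists are sorted and a two-pointer walk advances the smaller head until a match or exhaustion.
import Mathlib
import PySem

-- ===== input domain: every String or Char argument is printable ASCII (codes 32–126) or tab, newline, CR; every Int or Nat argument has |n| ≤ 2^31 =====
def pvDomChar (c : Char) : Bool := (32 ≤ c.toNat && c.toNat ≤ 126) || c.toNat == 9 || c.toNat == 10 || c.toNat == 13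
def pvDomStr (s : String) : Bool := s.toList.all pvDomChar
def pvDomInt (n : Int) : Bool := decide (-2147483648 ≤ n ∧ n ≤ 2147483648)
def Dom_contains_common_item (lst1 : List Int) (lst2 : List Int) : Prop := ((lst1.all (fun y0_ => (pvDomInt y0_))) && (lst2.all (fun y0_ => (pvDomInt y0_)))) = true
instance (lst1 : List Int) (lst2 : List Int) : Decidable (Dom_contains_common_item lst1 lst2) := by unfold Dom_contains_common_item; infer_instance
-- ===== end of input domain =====

-- B replaces A's hash-based dict build + lookup scan with sort-then-merge (two sorted lists, two-pointer walk); alternative algorithm, same result.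

-- ===== PORT A =====
-- the second loop: return True on the first j of lst2 present in the dict, else False
def ccScanA (d : PySem.Dict Int Bool) : List Int → Bool
  | [] => false
  | j :: rest => if d.contains j then true else ccScanA d rest

def contains_common_item (lst1 : List Int) (lst2 : List Int) : Bool :=
  let dict := lst1.foldl (fun d i => if d.contains i then d else d.insert i true) PySem.Dict.empty
  ccScanA dict lst2

-- ===== PORT B =====
-- the while loop over indices i, j into the sorted arrays, transcribed as recursion on the two list suffixes
def ccMerge : List Int → List Int → Bool
  | [], _ => false
  | _ :: _, [] => false
  | a :: as_, b :: bs =>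
    if a = b then true
    else if a < b then ccMerge as_ (b :: bs)
    else ccMerge (a :: as_) bs

def contains_common_item_alt (lst1 : List Int) (lst2 : List Int) : Bool :=
  ccMerge (PySem.List.sorted lst1 (fun x => x) false) (PySem.List.sorted lst2 (fun x => x) false)

-- ===== PRECONDITION & SPEC =====
def Spec_contains_common_item (lst1 : List Int) (lst2 : List Int) (out : Bool) : Prop := out = contains_common_item_alt lst1 lst2
instance (lst1 : List Int) (lst2 : List Int) (out : Bool) : Decidable (Spec_contains_common_item lst1 lst2 out) := by unfold Spec_contains_common_item; infer_instance

-- ===== CLAIM (what is proved, stated in full; the proofs are below) =====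
def Claim_equal_contains_common_item : Prop := ∀ (lst1 : List Int) (lst2 : List Int), Dom_contains_common_item lst1 lst2 → Spec_contains_common_item lst1 lst2 (contains_common_item lst1 lst2)

-- ===== LEMMAS AND PROOFS =====

-- the dict built by A's first loop contains exactly the elements of lst1
lemma ccDict_contains (lst1 : List Int) (x : Int) :
    (lst1.foldl (fun d i => if d.contains i then d else d.insert i true) PySem.Dict.empty).contains x = true ↔ x ∈ lst1 := by
  suffices h : ∀ (l : List Int) (d : PySem.Dict Int Bool),
      (l.foldl (fun d i => if d.contains i then d else d.insert i true) d).contains x = true ↔ d.contains x = true ∨ x ∈ l by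
    simpa using h lst1 PySem.Dict.empty
  intro l
  induction l with
  | nil => intro d; simp
  | cons a t ih =>
    intro d
    simp only [List.foldl_cons, List.mem_cons]
    split_ifs with hc
    · rw [ih]
      constructor
      · tauto
      · rintro (h | h | h)
        exacts [Or.inl h, Or.inl (h ▸ hc), Or.inr h]
    · rw [ih, PySem.Dict.contains_insert]
      simp only [Bool.or_eq_true, beq_iff_eq]
      tauto

lemma ccScanA_eq_any (d : PySem.Dict Int Bool) (l : List Int) :
    ccScanA d l = l.any (fun j => d.contains j) := by
  induction l with
  | nil => rfl
  | cons a t ih => by_cases h : d.contains a = true <;> simp [ccScanA, h, ih]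

-- on sorted lists the two-pointer merge decides exactly whether a common element exists
lemma ccMerge_iff (a b : List Int) (ha : a.Pairwise (· ≤ ·)) (hb : b.Pairwise (· ≤ ·)) :
    ccMerge a b = true ↔ ∃ x, x ∈ a ∧ x ∈ b := by
  induction a, b using ccMerge.induct with
  | case1 b => simp [ccMerge]
  | case2 x as => simp [ccMerge]
  | case3 as y bs =>
    exact ⟨fun _ => ⟨y, List.mem_cons_self, List.mem_cons_self⟩, fun _ => by simp [ccMerge]⟩
  | case4 x as y bs hne hlt ih =>
    rw [List.pairwise_cons] at ha
    rw [show ccMerge (x :: as) (y :: bs) = ccMerge as (y :: bs) by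
      simp [ccMerge, hne, hlt]]
    rw [ih ha.2 hb]
    constructor
    · rintro ⟨z, hz1, hz2⟩; exact ⟨z, List.mem_cons_of_mem _ hz1, hz2⟩
    · rintro ⟨z, hz1, hz2⟩
      rcases List.mem_cons.mp hz1 with h | h
      · subst h
        rcases List.mem_cons.mp hz2 with h2 | h2
        · exact absurd h2 hne
        · exact absurd ((List.pairwise_cons.mp hb).1 z h2) (by omega)
      · exact ⟨z, h, hz2⟩
  | case5 x as y bs hne hge ih =>
    rw [List.pairwise_cons] at hb
    rw [show ccMerge (x :: as) (y :: bs) = ccMerge (x :: as) bs by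
      simp [ccMerge, hne, hge]]
    rw [ih ha hb.2]
    constructor
    · rintro ⟨z, hz1, hz2⟩; exact ⟨z, hz1, List.mem_cons_of_mem _ hz2⟩
    · rintro ⟨z, hz1, hz2⟩
      rcases List.mem_cons.mp hz2 with h2 | h2
      · subst h2
        rcases List.mem_cons.mp hz1 with h | h
        · exact absurd h.symm hne
        · have := (List.pairwise_cons.mp ha).1 z h
          exact absurd hge (by omega)
      · exact ⟨z, hz1, h2⟩

-- ===== VERDICT (by name: the statement is the Claim_ definition above) =====
theorem contains_common_item_spec : Claim_equal_contains_common_item := by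
  intro lst1 lst2 _
  unfold Spec_contains_common_item contains_common_item contains_common_item_alt
  rw [ccScanA_eq_any, Bool.eq_iff_iff,
    ccMerge_iff _ _ (PySem.List.sorted_pairwise lst1 (fun x => x))
      (PySem.List.sorted_pairwise lst2 (fun x => x))]
  simp only [List.any_eq_true, ccDict_contains, PySem.List.mem_sorted]
  exact ⟨fun ⟨j, h2, h1⟩ => ⟨j, h1, h2⟩, fun ⟨x, h1, h2⟩ => ⟨x, h2, h1⟩⟩
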